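-- pv_equiv track=rewrite | github.com/Imdraks/botagency | backend/app/ingestion/email_connector.py | _find_primary_link
-- ===== SOURCE A (Python) =====
-- from typing import List, Dict, Any, Optional
--
-- def _find_primary_link(links: List[str], text: str) -> Optional[str]:
--     """Find the most likely primary/action link"""
--     # Priority keywords
--     priority_keywords = [
--         'candidat', 'postuler', 'repondre', 'reply', 'particip',
--         'inscription', 'register', 'apply', 'submit', 'formulaire',
--         'appel', 'consultation', 'marche', 'tender'
--     ]
--
--     for link in links:
--         link_lower = link.lower()
--         for keyword in priority_keywords:
--             if keyword in link_lower:
--                 return link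
--
--     # Return first non-image link
--     for link in links:
--         if not any(ext in link.lower() for ext in ['.jpg', '.png', '.gif', '.svg']):
--             return link
--
--     return links[0] if links else None
-- ===== SOURCE B (Python) =====
-- from typing import List, Optional
--
-- def _find_primary_link(links: List[str], text: str) -> Optional[str]:
--     """Single pass: return first priority-keyword link; otherwise first non-image link; otherwise links[0]/None."""
--     priority_keywords = [
--         'candidat', 'postuler', 'repondre', 'reply', 'particip',
--         'inscription', 'register', 'apply', 'submit', 'formulaire',
--         'appel', 'consultation', 'marche', 'tender'
--     ]
--     image_exts = ['.jpg', '.png', '.gif', '.svg']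
--     first_nonimage = None
--     for link in links:
--         low = link.lower()
--         if any(k in low for k in priority_keywords):
--             return link
--         if first_nonimage is None and not any(e in low for e in image_exts):
--             first_nonimage = link
--     if first_nonimage is not None:
--         return first_nonimage
--     return links[0] if links else None
-- ===== Notes on version B (the rewrite author's own statement) =====
-- stated objective: simpler
-- what changed: Replaces A's two separate scans over links (one for priority keywords, one for the first non-image link) by a single traversal that returns on a keyword hit and remembers the first non-image link in an accumulator.
import Mathlib
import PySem

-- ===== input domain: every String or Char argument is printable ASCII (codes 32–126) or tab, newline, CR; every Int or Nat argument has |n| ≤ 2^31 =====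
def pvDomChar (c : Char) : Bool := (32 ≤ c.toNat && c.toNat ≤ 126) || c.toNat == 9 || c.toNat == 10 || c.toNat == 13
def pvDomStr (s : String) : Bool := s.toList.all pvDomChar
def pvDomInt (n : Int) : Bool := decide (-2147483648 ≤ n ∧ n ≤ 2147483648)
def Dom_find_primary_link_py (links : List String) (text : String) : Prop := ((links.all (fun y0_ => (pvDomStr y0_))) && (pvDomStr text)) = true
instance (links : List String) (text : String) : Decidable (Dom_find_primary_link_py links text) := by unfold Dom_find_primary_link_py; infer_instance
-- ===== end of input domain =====

-- B merges A's two scans over `links` into a single pass with a `first_nonimage`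
-- accumulator (objective: simpler, one traversal instead of two).

-- ===== PORT A =====
def pvKeywords : List String :=
  ["candidat", "postuler", "repondre", "reply", "particip",
   "inscription", "register", "apply", "submit", "formulaire",
   "appel", "consultation", "marche", "tender"]

def pvImgExts : List String := [".jpg", ".png", ".gif", ".svg"]

-- inner `for keyword in priority_keywords: if keyword in link_lower: return link`
def pvKwLoop (kws : List String) (linkLower : String) (link : String) : Option String :=
  match kws with
  | [] => none
  | k :: rest => if PySem.Str.isIn k linkLower then some link else pvKwLoop rest linkLower link

-- first `for link in links` loop of A
def pvLoop1 (links : List String) : Option String :=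
  match links with
  | [] => none
  | l :: rest =>
    match pvKwLoop pvKeywords (PySem.Str.lower l) l with
    | some r => some r
    | none => pvLoop1 rest

-- second `for link in links` loop of A (first non-image link)
def pvLoop2 (links : List String) : Option String :=
  match links with
  | [] => none
  | l :: rest =>
    if !(pvImgExts.any (fun e => PySem.Str.isIn e (PySem.Str.lower l))) then some l
    else pvLoop2 rest

def find_primary_link_py (links : List String) (text : String) : Option String :=
  match pvLoop1 links with
  | some r => some r
  | none =>
    match pvLoop2 links with
    | some r => some r
    | none => links.head?   -- links[0] if links else None

-- ===== PORT B =====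
-- single pass carrying the `first_nonimage` accumulator; `orig` kept for the final `links[0] if links else None`
def pvAltLoop (links : List String) (firstNonimage : Option String) (orig : List String) : Option String :=
  match links with
  | [] =>
    match firstNonimage with
    | some r => some r
    | none => orig.head?
  | l :: rest =>
    let low := PySem.Str.lower l
    if pvKeywords.any (fun k => PySem.Str.isIn k low) then some l
    else
      pvAltLoop rest
        (if firstNonimage.isNone && !(pvImgExts.any (fun e => PySem.Str.isIn e low)) then some l
         else firstNonimage) orig

def find_primary_link_py_alt (links : List String) (text : String) : Option String :=
  pvAltLoop links none links

-- ===== PRECONDITION & SPEC =====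
def Spec_find_primary_link_py (links : List String) (text : String) (out : Option String) : Prop := out = find_primary_link_py_alt links text
instance (links : List String) (text : String) (out : Option String) : Decidable (Spec_find_primary_link_py links text out) := by unfold Spec_find_primary_link_py; infer_instance

-- ===== CLAIM (what is proved, stated in full; the proofs are below) =====
def Claim_equal_find_primary_link_py : Prop := ∀ (links : List String) (text : String), Dom_find_primary_link_py links text → Spec_find_primary_link_py links text (find_primary_link_py links text)

-- ===== LEMMAS AND PROOFS =====

theorem pvKwLoop_eq (kws : List String) (low link : String) :
    pvKwLoop kws low link = if kws.any (fun k => PySem.Str.isIn k low) then some link else none := by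
  induction kws with
  | nil => simp [pvKwLoop]
  | cons k rest ih =>
    simp only [pvKwLoop, List.any_cons, ih]
    rcases Bool.eq_false_or_eq_true (PySem.Str.isIn k low) with h | h <;>
      simp only [h, Bool.false_or, Bool.true_or, if_true, Bool.false_eq_true, if_false]

theorem pvAltLoop_eq (links : List String) (f : Option String) (orig : List String) :
    pvAltLoop links f orig =
      match pvLoop1 links with
      | some r => some r
      | none =>
        match f with
        | some r => some r
        | none =>
          match pvLoop2 links with
          | some r => some r
          | none => orig.head? := by
  induction links generalizing f with
  | nil => cases f <;> simp [pvAltLoop, pvLoop1, pvLoop2]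
  | cons l rest ih =>
    cases hkw : pvKeywords.any fun k => PySem.Str.isIn k (PySem.Str.lower l) with
    | true => simp only [pvAltLoop, pvLoop1, pvKwLoop_eq, hkw, if_true]
    | false =>
      cases f with
      | some r =>
        simp only [pvAltLoop, pvLoop1, pvKwLoop_eq, hkw, Bool.false_eq_true, if_false, ih,
          Option.isNone_some, Bool.false_and]
      | none =>
        cases himg : pvImgExts.any fun e => PySem.Str.isIn e (PySem.Str.lower l) with
        | true =>
          simp only [pvAltLoop, pvLoop1, pvLoop2, pvKwLoop_eq, hkw, himg, Bool.not_true,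
            Option.isNone_none, Bool.true_and, Bool.false_eq_true, if_false, ih]
        | false =>
          simp only [pvAltLoop, pvLoop1, pvLoop2, pvKwLoop_eq, hkw, himg, Bool.not_false,
            Option.isNone_none, Bool.true_and, Bool.false_eq_true, if_false, if_true, ih]

-- ===== VERDICT (by name: the statement is the Claim_ definition above) =====
theorem find_primary_link_py_spec : Claim_equal_find_primary_link_py := by
  intro links text _
  unfold Spec_find_primary_link_py find_primary_link_py find_primary_link_py_alt
  rw [pvAltLoop_eq]
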